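-- pv_equiv track=rewrite | github.com/co1dtype/Dacon_Text_Recognition | modules/metrics.py | correct_prediction
-- ===== SOURCE A (Python) =====
-- def correct_prediction(word):
--     parts = word.split("-")
--
--     def remove_duplicates(text):
--         if len(text) > 1:
--             letters = [text[0]] + [letter for idx, letter in enumerate(text[1:], start=1) if text[idx] != text[idx - 1]]
--         elif len(text) == 1:
--             letters = [text[0]]
--         else:
--             return ""
--         return "".join(letters)
--     parts = [remove_duplicates(part) for part in parts]
--     corrected_word = "".join(parts)
--     return corrected_word
-- ===== SOURCE B (Python) =====
-- def correct_prediction(word):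
--     out = []
--     prev = None
--     for c in word:
--         if c == "-":
--             prev = None
--         else:
--             if prev is None or c != prev:
--                 out.append(c)
--             prev = c
--     return "".join(out)
-- ===== Notes on version B (the rewrite author's own statement) =====
-- stated objective: faster
-- what changed: Replaces split-on-hyphen + per-part index-based duplicate filtering + join with a single left-to-right pass keeping only the previous character, reset at each hyphen; no intermediate part lists are built.
import Mathlib
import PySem

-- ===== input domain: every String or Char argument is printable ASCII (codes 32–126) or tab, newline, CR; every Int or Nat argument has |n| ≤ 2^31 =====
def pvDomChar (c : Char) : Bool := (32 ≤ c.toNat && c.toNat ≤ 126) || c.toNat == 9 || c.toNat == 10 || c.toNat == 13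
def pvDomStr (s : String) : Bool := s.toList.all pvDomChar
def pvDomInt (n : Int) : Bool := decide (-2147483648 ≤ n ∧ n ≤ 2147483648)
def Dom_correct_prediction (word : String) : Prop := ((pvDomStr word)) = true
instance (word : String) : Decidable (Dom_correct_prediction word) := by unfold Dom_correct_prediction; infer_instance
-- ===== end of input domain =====

-- B replaces split-on-'-' plus per-part index-based duplicate removal by one pass over the
-- characters with a `prev` register reset at hyphens (objective: faster by a constant factor — one pass, no intermediate part lists).

-- ===== PORT A =====
-- remove_duplicates: the inner helper, transliterated (indices are in range under the guards)
def removeDupA (text : List Char) : List Char :=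
  if text.length > 1 then
    [PySem.List.pyGetD text 0 ' '] ++
      ((PySem.List.enumerate (PySem.List.slice text (some 1) none) 1).filter
        (fun p => PySem.List.pyGetD text p.1 ' ' ≠ PySem.List.pyGetD text (p.1 - 1) ' ')).map (·.2)
  else if text.length = 1 then
    [PySem.List.pyGetD text 0 ' ']
  else
    []

def correct_prediction (word : String) : String :=
  String.mk (PySem.Chars.join []
    ((PySem.Chars.splitOn word.toList ['-']).map removeDupA))

-- ===== PORT B =====
def stepB (st : Option Char × List Char) (c : Char) : Option Char × List Char :=
  if c = '-' then (none, st.2)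
  else
    match st.1 with
    | none => (some c, st.2 ++ [c])
    | some p => if c = p then (some c, st.2) else (some c, st.2 ++ [c])

def correct_prediction_alt (word : String) : String :=
  String.mk (word.toList.foldl stepB (none, [])).2

-- ===== PRECONDITION & SPEC =====
def Spec_correct_prediction (word : String) (out : String) : Prop := out = correct_prediction_alt word
instance (word : String) (out : String) : Decidable (Spec_correct_prediction word out) := by unfold Spec_correct_prediction; infer_instance

-- ===== CLAIM (what is proved, stated in full; the proofs are below) =====
def Claim_equal_correct_prediction : Prop := ∀ (word : String), Dom_correct_prediction word → Spec_correct_prediction word (correct_prediction word)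

-- ===== LEMMAS AND PROOFS =====

-- spec-level split on '-' : (first segment, remaining segments)
def spPV : List Char → List Char × List (List Char)
  | [] => ([], [])
  | c :: r =>
    let p := spPV r
    if c = '-' then ([], p.1 :: p.2) else (c :: p.1, p.2)

-- spec-level duplicate collapse within a segment
def ddgo (p : Char) : List Char → List Char
  | [] => []
  | c :: r => (if c = p then [] else [c]) ++ ddgo c r

def dd : List Char → List Char
  | [] => []
  | c :: r => c :: ddgo c r

-- spec-level one-pass recursion matching B
def baltA : Option Char → List Char → List Char
  | _, [] => []
  | prev, c :: r =>
    if c = '-' then baltA none r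
    else (match prev with
      | none => [c]
      | some q => if c = q then [] else [c]) ++ baltA (some c) r

theorem go_eq_spPV : ∀ (fuel : Nat) (l cur : List Char) (acc : List (List Char)),
    l.length < fuel →
    PySem.Chars.splitOn.go ['-'] fuel l cur acc
      = acc.reverse ++ (cur.reverse ++ (spPV l).1) :: (spPV l).2 := by
  intro fuel
  induction fuel with
  | zero => intro l cur acc h; omega
  | succ f ih =>
    intro l cur acc h
    cases l with
    | nil => simp [PySem.Chars.splitOn.go, spPV]
    | cons c r =>
      by_cases hc : c = '-'
      · subst hc
        rw [show PySem.Chars.splitOn.go ['-'] (f+1) ('-' :: r) cur acc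
              = PySem.Chars.splitOn.go ['-'] f (List.drop 1 ('-' :: r)) [] (cur.reverse :: acc) by
            simp [PySem.Chars.splitOn.go, List.isPrefixOf]]
        rw [ih _ _ _ (by simp at h ⊢; omega)]
        simp [spPV]
      · have hne : '-' ≠ c := fun h => hc h.symm
        rw [show PySem.Chars.splitOn.go ['-'] (f+1) (c :: r) cur acc
              = PySem.Chars.splitOn.go ['-'] f r (c :: cur) acc by
            simp [PySem.Chars.splitOn.go, List.isPrefixOf, hne]]
        rw [ih _ _ _ (by simp at h ⊢; omega)]
        simp [spPV, hc]

theorem splitOn_eq_spPV (l : List Char) :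
    PySem.Chars.splitOn l ['-'] = (spPV l).1 :: (spPV l).2 := by
  unfold PySem.Chars.splitOn
  rw [go_eq_spPV (l.length + 1) l [] [] (by omega)]
  simp

-- the comprehension of remove_duplicates equals ddgo
theorem enum_filter_eq_ddgo : ∀ (u t : List Char) (k : Nat) (a : Char),
    t.drop k = a :: u →
    ((PySem.List.enumerate u ((k : Int) + 1)).filter
        (fun p => PySem.List.pyGetD t p.1 ' ' ≠ PySem.List.pyGetD t (p.1 - 1) ' ')).map (·.2)
      = ddgo a u := by
  intro u
  induction u with
  | nil => intro t k a h; simp [PySem.List.enumerate, ddgo]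
  | cons c u' ih =>
    intro t k a h
    have hta : t[k]? = some a := by
      have := congrArg (fun l => l[0]?) h
      simpa [List.getElem?_drop] using this
    have htc : t[k + 1]? = some c := by
      have := congrArg (fun l => l[1]?) h
      simpa [List.getElem?_drop] using this
    have hga : PySem.List.pyGetD t ((k : Int)) ' ' = a := by
      simp [PySem.List.pyGetD, PySem.List.pyGet?_natCast, hta]
    have hgc : PySem.List.pyGetD t ((k : Int) + 1) ' ' = c := by
      rw [show ((k : Int) + 1) = ((k + 1 : Nat) : Int) by push_cast; ring,
        PySem.List.pyGetD_natCast]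
      simp [List.getD, htc]
    have hdrop : t.drop (k + 1) = c :: u' := by
      have := congrArg (List.drop 1) h
      rw [List.drop_drop] at this
      simpa [Nat.add_comm] using this
    have ihz := ih t (k + 1) c hdrop
    rw [show (((k + 1 : Nat) : Int) + 1) = ((k : Int) + 1 + 1) by push_cast; ring] at ihz
    simp only [PySem.List.enumerate, List.filter_cons, List.map]
    rw [show ((k : Int) + 1 - 1) = ((k : Int)) by ring, hgc, hga]
    by_cases hca : c = a
    · subst hca
      simp only [ddgo, if_pos rfl, List.nil_append]
      simpa using ihz
    · simp only [ddgo, if_neg hca]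
      have : (decide (c ≠ a)) = true := by simp [hca]
      rw [this]
      simpa [List.map] using ihz

theorem dd_nil : dd [] = [] := rfl
theorem dd_cons (c : Char) (r : List Char) : dd (c :: r) = c :: ddgo c r := rfl

theorem removeDupA_eq_dd (t : List Char) : removeDupA t = dd t := by
  match t with
  | [] => simp [removeDupA, dd]
  | [c] =>
    simp only [removeDupA, dd, ddgo]
    rw [if_neg (by simp), if_pos (by simp)]
    rw [show (0 : Int) = ((0 : Nat) : Int) by norm_num, PySem.List.pyGetD_natCast]
    rfl
  | c1 :: c2 :: r =>
    have h := enum_filter_eq_ddgo (c2 :: r) (c1 :: c2 :: r) 0 c1 (by simp)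
    simp only [Nat.cast_zero, zero_add] at h
    simp only [removeDupA, dd_cons]
    rw [if_pos (by simp)]
    have hsl : PySem.List.slice (c1 :: c2 :: r) (some 1) none = c2 :: r := by
      simpa using PySem.List.slice_from (c1 :: c2 :: r) (a := 1) (by norm_num)
    rw [hsl, h]
    rw [show (0 : Int) = ((0 : Nat) : Int) by norm_num, PySem.List.pyGetD_natCast]
    rfl

-- the split-then-dedup pipeline equals the one-pass recursion
theorem main_split (l : List Char) :
    (dd (spPV l).1 ++ ((spPV l).2.map dd).flatten = baltA none l)
    ∧ (∀ p : Char, ddgo p (spPV l).1 ++ ((spPV l).2.map dd).flatten = baltA (some p) l) := by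
  induction l with
  | nil => simp [spPV, dd, ddgo, baltA]
  | cons c r ih =>
    by_cases hc : c = '-'
    · subst hc
      refine ⟨?_, fun p => ?_⟩
      · simp only [spPV, baltA, if_pos rfl, dd_nil, List.map_cons, List.flatten_cons,
          List.nil_append]
        exact ih.1
      · simp only [spPV, baltA, if_pos rfl, ddgo, List.map_cons, List.flatten_cons,
          List.nil_append]
        exact ih.1
    · refine ⟨?_, fun p => ?_⟩
      · simp only [spPV, baltA, if_neg hc, dd_cons, List.cons_append, List.singleton_append]
        rw [ih.2 c]
        simp
      · by_cases hcp : c = p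
        · subst hcp
          simp only [spPV, baltA, if_neg hc, ddgo, if_pos rfl, List.nil_append]
          exact ih.2 c
        · simp only [spPV, baltA, if_neg hc, ddgo, if_neg hcp, List.cons_append,
            List.nil_append, List.singleton_append]
          rw [ih.2 c]

theorem foldl_stepB (l : List Char) : ∀ (p : Option Char) (acc : List Char),
    (l.foldl stepB (p, acc)).2 = acc ++ baltA p l := by
  induction l with
  | nil => intro p acc; simp [baltA]
  | cons c r ih =>
    intro p acc
    by_cases hc : c = '-'
    · subst hc
      simp [stepB, baltA, ih]
    · cases p with
      | none => simp [stepB, hc, baltA, ih]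
      | some q =>
        by_cases hcq : c = q
        · subst hcq
          simp [stepB, hc, baltA, ih]
        · simp [stepB, hc, baltA, hcq, ih]

theorem join_nil_flatten (xs : List (List Char)) : PySem.Chars.join [] xs = xs.flatten := by
  induction xs with
  | nil => simp [PySem.Chars.join, List.intercalate]
  | cons x t ih =>
    cases t with
    | nil => simp [PySem.Chars.join, List.intercalate]
    | cons y t' =>
      simp only [PySem.Chars.join, List.intercalate] at ih ⊢
      simp [List.intersperse, List.flatten] at ih ⊢
      exact ih

-- ===== VERDICT (by name: the statement is the Claim_ definition above) =====
theorem correct_prediction_spec : Claim_equal_correct_prediction := by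
  intro word _
  unfold Spec_correct_prediction correct_prediction correct_prediction_alt
  rw [splitOn_eq_spPV]
  simp only [List.map_cons, join_nil_flatten, List.flatten_cons]
  rw [foldl_stepB word.toList none []]
  have hm := main_split word.toList
  rw [removeDupA_eq_dd]
  have : ((spPV word.toList).2.map removeDupA) = ((spPV word.toList).2.map dd) := by
    apply List.map_congr_left; intro a _; exact removeDupA_eq_dd a
  rw [this, hm.1]
  simp
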